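-- pv_equiv track=rewrite | github.com/fld133/f1 | confidence_router.py | phrase_match
-- ===== SOURCE A (Python) =====
-- def phrase_match(question: str, keywords: set):
--     question_lc = question.lower()
--     matched = set()
--     for kw in keywords:
--         if " " in kw:  # multi-word phrase
--             if kw in question_lc:
--                 matched.add(kw)
--     return matched
-- ===== SOURCE B (Python) =====
-- def phrase_match(question: str, keywords: set):
--     # Loop interchange: one left-to-right sweep over the question, testing at each
--     # position which multi-word keywords start there; a found-set skips matched ones.
--     q = question.lower()
--     multi = [kw for kw in keywords if " " in kw]
--     found = set()
--     for i in range(len(q) + 1):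
--         for kw in multi:
--             if kw not in found and q.startswith(kw, i):
--                 found.add(kw)
--     return {kw for kw in multi if kw in found}
-- ===== Notes on version B (the rewrite author's own statement) =====
-- stated objective: alternative
-- what changed: B interchanges the loops: instead of running a builtin substring search over the whole question for each keyword, it makes a single left-to-right sweep over the question positions, testing at each position which multi-word keywords start there (skipping keywords already found), then returns the found ones.
import Mathlib
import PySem

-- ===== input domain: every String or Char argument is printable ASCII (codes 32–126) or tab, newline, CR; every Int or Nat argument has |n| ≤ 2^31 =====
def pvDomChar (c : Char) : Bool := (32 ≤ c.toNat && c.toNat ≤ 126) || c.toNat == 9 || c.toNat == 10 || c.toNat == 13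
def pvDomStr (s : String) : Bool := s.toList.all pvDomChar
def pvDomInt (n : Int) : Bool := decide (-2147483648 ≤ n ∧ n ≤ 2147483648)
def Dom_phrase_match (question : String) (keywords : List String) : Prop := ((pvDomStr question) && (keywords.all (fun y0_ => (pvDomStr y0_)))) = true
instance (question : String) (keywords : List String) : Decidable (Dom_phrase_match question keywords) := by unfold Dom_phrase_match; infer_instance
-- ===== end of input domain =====

-- B interchanges the loops: a single sweep over the question positions testing prefixes, instead of a builtin substring search per keyword; alternative structure, same results.

-- ===== PORT A =====
def phrase_match (question : String) (keywords : List String) : List String :=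
  let question_lc := PySem.Str.lower question
  keywords.foldl
    (fun matched kw =>
      if PySem.Str.isIn " " kw then
        if PySem.Str.isIn kw question_lc then PySem.Set.add matched kw else matched
      else matched)
    ([] : List String)

-- ===== PORT B =====
-- q.startswith(kw, i) for 0 ≤ i (the only use: i ranges over range(0, len(q)+1)); exact there.
def pyStartswithAt (s kw : String) (i : Int) : Bool :=
  PySem.Chars.startswith (s.toList.drop i.toNat) kw.toList

def phrase_match_alt (question : String) (keywords : List String) : List String :=
  let q := PySem.Str.lower question
  let multi := keywords.filter (fun kw => PySem.Str.isIn " " kw)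
  let found :=
    (PySem.List.pyRange 0 ((PySem.Str.len q) + 1) 1).foldl
      (fun found i =>
        multi.foldl
          (fun found kw =>
            if !(PySem.Set.contains found kw) && pyStartswithAt q kw i then
              PySem.Set.add found kw
            else found)
          found)
      ([] : List String)
  PySem.Set.ofList (multi.filter (fun kw => PySem.Set.contains found kw))

-- ===== PRECONDITION & SPEC =====
def Spec_phrase_match (question : String) (keywords : List String) (out : List String) : Prop := out = phrase_match_alt question keywords
instance (question : String) (keywords : List String) (out : List String) : Decidable (Spec_phrase_match question keywords out) := by unfold Spec_phrase_match; infer_instance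

-- ===== CLAIM (what is proved, stated in full; the proofs are below) =====
def Claim_equal_phrase_match : Prop := ∀ (question : String) (keywords : List String), Dom_phrase_match question keywords → Spec_phrase_match question keywords (phrase_match question keywords)

-- ===== LEMMAS AND PROOFS =====

-- A's loop is a conditional Set.add fold: equal to folding add over the filtered list.
theorem pv_A_shape (q : String) (keywords : List String) (s : List String) :
    keywords.foldl
      (fun matched kw =>
        if PySem.Str.isIn " " kw then
          if PySem.Str.isIn kw q then PySem.Set.add matched kw else matched
        else matched) s
    = (keywords.filter (fun kw => PySem.Str.isIn " " kw && PySem.Str.isIn kw q)).foldl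
        PySem.Set.add s := by
  induction keywords generalizing s with
  | nil => rfl
  | cons kw rest ih =>
    simp only [List.foldl_cons, List.filter_cons]
    cases h1 : PySem.Str.isIn " " kw <;> cases h2 : PySem.Str.isIn kw q <;>
      simp only [Bool.false_and, Bool.true_and, Bool.and_false, Bool.and_true, Bool.and_self,
        Bool.false_eq_true, eq_self_iff_true, if_false, if_true, ite_true, ite_false] <;>
      first
        | exact ih s
        | exact ih (PySem.Set.add s kw)

-- membership through B's inner fold (one question position)
theorem pv_inner_mem (g : String → Bool) (multi : List String) (s : List String) (x : String) :
    x ∈ multi.foldl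
      (fun s kw => if !(PySem.Set.contains s kw) && g kw then PySem.Set.add s kw else s) s
    ↔ x ∈ s ∨ (x ∈ multi ∧ g x = true) := by
  induction multi generalizing s with
  | nil => simp
  | cons kw rest ih =>
    simp only [List.foldl_cons]
    by_cases hc : PySem.Set.contains s kw = true
    · have hmem : kw ∈ s := (PySem.Set.contains_iff s kw).mp hc
      rw [hc]
      simp only [Bool.not_true, Bool.false_and, Bool.false_eq_true, if_false, ih, List.mem_cons]
      constructor
      · rintro (h | ⟨h, hgx⟩)
        · exact Or.inl h
        · exact Or.inr ⟨Or.inr h, hgx⟩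
      · rintro (h | ⟨rfl | h, hgx⟩)
        · exact Or.inl h
        · exact Or.inl hmem
        · exact Or.inr ⟨h, hgx⟩
    · have hc' : PySem.Set.contains s kw = false := Bool.eq_false_iff.mpr hc
      rw [hc']
      cases hg : g kw
      · simp only [Bool.not_false, Bool.true_and, hg, Bool.false_eq_true, if_false, ih,
          List.mem_cons]
        constructor
        · rintro (h | ⟨h, hgx⟩)
          · exact Or.inl h
          · exact Or.inr ⟨Or.inr h, hgx⟩
        · rintro (h | ⟨rfl | h, hgx⟩)
          · exact Or.inl h
          · rw [hg] at hgx; cases hgx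
          · exact Or.inr ⟨h, hgx⟩
      · simp only [Bool.not_false, Bool.true_and, hg, if_true, ih, PySem.Set.mem_add,
          List.mem_cons]
        constructor
        · rintro ((h | rfl) | ⟨h, hgx⟩)
          · exact Or.inl h
          · exact Or.inr ⟨Or.inl rfl, hg⟩
          · exact Or.inr ⟨Or.inr h, hgx⟩
        · rintro (h | ⟨rfl | h, hgx⟩)
          · exact Or.inl (Or.inl h)
          · exact Or.inl (Or.inr rfl)
          · exact Or.inr ⟨h, hgx⟩

-- membership through B's outer fold (all positions in I)
theorem pv_outer_mem (g : String → Int → Bool) (multi : List String) (I : List Int)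
    (s : List String) (x : String) :
    x ∈ I.foldl
      (fun s i => multi.foldl
        (fun s kw => if !(PySem.Set.contains s kw) && g kw i then PySem.Set.add s kw else s) s) s
    ↔ x ∈ s ∨ (x ∈ multi ∧ ∃ i ∈ I, g x i = true) := by
  induction I generalizing s with
  | nil => simp
  | cons i rest ih =>
    simp only [List.foldl_cons, ih, pv_inner_mem, List.mem_cons]
    constructor
    · rintro ((h | ⟨hm, hgx⟩) | ⟨hm, j, hj, hgx⟩)
      · exact Or.inl h
      · exact Or.inr ⟨hm, i, Or.inl rfl, hgx⟩
      · exact Or.inr ⟨hm, j, Or.inr hj, hgx⟩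
    · rintro (h | ⟨hm, j, (rfl | hj), hgx⟩)
      · exact Or.inl (Or.inl h)
      · exact Or.inl (Or.inr ⟨hm, hgx⟩)
      · exact Or.inr ⟨hm, j, hj, hgx⟩

-- a keyword containing a space is nonempty
theorem pv_ne_nil_of_space (kw : String) (h : PySem.Str.isIn " " kw = true) :
    kw.toList ≠ [] := by
  have h2 := (PySem.Str.isIn_iff_infix " " kw).mp h
  intro hnil
  rw [hnil] at h2
  simp at h2

-- prefix-at-some-position over range(0, len+1) ↔ builtin substring
theorem pv_exists_pos_iff (q kw : String) (hkw : kw.toList ≠ []) :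
    (∃ i ∈ PySem.List.pyRange 0 ((PySem.Str.len q) + 1) 1, pyStartswithAt q kw i = true)
    ↔ PySem.Str.isIn kw q = true := by
  constructor
  · rintro ⟨i, _, hi⟩
    have hpre : kw.toList <+: (q.toList.drop i.toNat) :=
      (PySem.Chars.startswith_iff _ _).mp hi
    have : PySem.Chars.isIn kw.toList q.toList = true :=
      (PySem.Chars.exists_prefix_drop_iff_isIn kw.toList q.toList).mp ⟨i.toNat, hpre⟩
    simpa using this
  · intro h
    have h' : PySem.Chars.isIn kw.toList q.toList = true := by simpa using h
    obtain ⟨j, hpre⟩ :=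
      (PySem.Chars.exists_prefix_drop_iff_isIn kw.toList q.toList).mpr h'
    have hlt : j < q.toList.length := by
      by_contra hge
      rw [not_lt] at hge
      rw [List.drop_eq_nil_of_le hge] at hpre
      exact hkw (List.prefix_nil.mp hpre)
    refine ⟨(j : Int), ?_, ?_⟩
    · rw [PySem.List.mem_pyRange_one]
      constructor
      · exact Int.natCast_nonneg j
      · have : PySem.Str.len q = (q.toList.length : Int) := by simp
        rw [this]
        exact_mod_cast Nat.lt_succ_of_lt hlt
    · unfold pyStartswithAt
      rw [Int.toNat_natCast]
      exact (PySem.Chars.startswith_iff _ _).mpr hpre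

-- B's found-set contains a multi-word keyword iff the builtin substring search finds it
theorem pv_found_contains (qlc : String) (keywords : List String) (kw : String)
    (hkw : kw ∈ keywords) (hsp : PySem.Str.isIn " " kw = true) :
    PySem.Set.contains
      ((PySem.List.pyRange 0 ((PySem.Str.len qlc) + 1) 1).foldl
        (fun found i => (keywords.filter (fun kw => PySem.Str.isIn " " kw)).foldl
          (fun found kw =>
            if !(PySem.Set.contains found kw) && pyStartswithAt qlc kw i then
              PySem.Set.add found kw
            else found) found) [])
      kw
    = PySem.Str.isIn kw qlc := by
  have hmulti : kw ∈ keywords.filter (fun kw => PySem.Str.isIn " " kw) :=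
    List.mem_filter.mpr ⟨hkw, hsp⟩
  have hiff := pv_outer_mem (fun kw i => pyStartswithAt qlc kw i)
    (keywords.filter (fun kw => PySem.Str.isIn " " kw))
    (PySem.List.pyRange 0 ((PySem.Str.len qlc) + 1) 1) [] kw
  have hkw' := pv_ne_nil_of_space kw hsp
  cases hin : PySem.Str.isIn kw qlc
  · refine Bool.eq_false_iff.mpr (fun hcon => ?_)
    have hm := (PySem.Set.contains_iff _ kw).mp hcon
    rcases hiff.mp hm with h | ⟨_, hex⟩
    · simp at h
    · rw [(pv_exists_pos_iff qlc kw hkw').mp hex] at hin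
      cases hin
  · exact (PySem.Set.contains_iff _ kw).mpr
      (hiff.mpr (Or.inr ⟨hmulti, (pv_exists_pos_iff qlc kw hkw').mpr hin⟩))

-- the two ports compute the same list
set_option maxHeartbeats 1000000 in
theorem pv_filter_eq (question : String) (keywords : List String) :
    phrase_match_alt question keywords = phrase_match question keywords := by
  simp only [phrase_match, phrase_match_alt]
  rw [pv_A_shape, PySem.Set.ofList_eq_foldl, List.filter_filter]
  refine congrArg (List.foldl PySem.Set.add []) (List.filter_congr ?_)
  intro kw hkw
  cases hsp : PySem.Str.isIn " " kw
  · simp only [Bool.and_false, Bool.false_and]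
  · simp only [Bool.and_true, Bool.true_and]
    exact pv_found_contains (PySem.Str.lower question) keywords kw hkw hsp

-- ===== VERDICT (by name: the statement is the Claim_ definition above) =====
theorem phrase_match_spec : Claim_equal_phrase_match := by
  intro question keywords _
  exact (pv_filter_eq question keywords).symm
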